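-- pv_equiv track=rewrite | github.com/AleksVassiliev/AdventOfCode | 2020/day06/day06.py | check_declaration_v1
-- ===== SOURCE A (Python) =====
-- def check_declaration_v1(data):
--     result = 0
--     group = set()
--     for line in data:
--         if line == '':
--             result += len(group)
--             group.clear()
--         else:
--             for ch in line:
--                 group.add(ch)
--     result += len(group)
--     return result
-- ===== SOURCE B (Python) =====
-- def check_declaration_v1(data):
--     n = len(data)
--     total = 0
--     i = 0
--     while i < n:
--         j = i
--         while j < n and data[j] != '':
--             j += 1
--         total += len(set(''.join(data[i:j])))
--         i = j + 1
--     return total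
-- ===== Notes on version B (the rewrite author's own statement) =====
-- stated objective: alternative
-- what changed: Replaces the single fold that grows and flushes a running character set line by line with a two-pointer index scan that delimits each blank-separated block, then counts len(set(''.join(block))) per block.
import Mathlib
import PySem

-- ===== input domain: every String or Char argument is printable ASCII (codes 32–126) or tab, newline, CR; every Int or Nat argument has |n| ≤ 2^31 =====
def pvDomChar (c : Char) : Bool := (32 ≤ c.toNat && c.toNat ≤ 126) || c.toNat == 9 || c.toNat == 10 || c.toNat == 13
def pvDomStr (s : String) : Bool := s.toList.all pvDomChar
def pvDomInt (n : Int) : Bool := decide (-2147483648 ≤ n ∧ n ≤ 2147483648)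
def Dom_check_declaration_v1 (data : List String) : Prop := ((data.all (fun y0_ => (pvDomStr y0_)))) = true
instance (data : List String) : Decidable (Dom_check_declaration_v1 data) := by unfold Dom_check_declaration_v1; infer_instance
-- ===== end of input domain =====

-- B replaces A's single fold with a running, flushed character set by a two-pointer index scan
-- that delimits each blank-separated block and counts len(set(''.join(block))) per block (alternative decomposition, same cost).

-- ===== PORT A =====
-- the for-loop over `data` with state (result, group); the trailing `result += len(group)` is the [] case
def pvALoop : List String → Int → PySem.Set Char → Int
  | [], result, group => result + PySem.Set.len group
  | line :: rest, result, group =>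
    if line = "" then pvALoop rest (result + PySem.Set.len group) PySem.Set.empty
    else pvALoop rest result (line.toList.foldl PySem.Set.add group)

def check_declaration_v1 (data : List String) : Int :=
  pvALoop data 0 PySem.Set.empty

-- ===== PORT B =====
-- inner `while j < n and data[j] != '': j += 1`
def pvScanJ (data : List String) (j : Nat) : Nat :=
  if j < data.length then
    (if data.getD j "" = "" then j else pvScanJ data (j + 1))
  else j
termination_by data.length - j

theorem pvScanJ_le (data : List String) (j : Nat) : j ≤ pvScanJ data j := by
  unfold pvScanJ
  split
  · split
    · exact le_refl j
    · exact Nat.le_trans (Nat.le_succ j) (pvScanJ_le data (j + 1))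
  · exact le_refl j
termination_by data.length - j

-- outer `while i < n` loop; data[i:j] with 0 ≤ i ≤ j is (data.drop i).take (j - i), exact here
def pvBLoop (data : List String) (i : Nat) (total : Int) : Int :=
  if i < data.length then
    let j := pvScanJ data i
    pvBLoop data (j + 1)
      (total + PySem.Set.len (PySem.Set.ofList (((data.drop i).take (j - i)).flatMap String.toList)))
  else total
termination_by data.length - i
decreasing_by
  have := pvScanJ_le data i
  omega

def check_declaration_v1_alt (data : List String) : Int :=
  pvBLoop data 0 0

-- ===== PRECONDITION & SPEC =====
def Spec_check_declaration_v1 (data : List String) (out : Int) : Prop := out = check_declaration_v1_alt data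
instance (data : List String) (out : Int) : Decidable (Spec_check_declaration_v1 data out) := by unfold Spec_check_declaration_v1; infer_instance

-- ===== CLAIM (what is proved, stated in full; the proofs are below) =====
def Claim_equal_check_declaration_v1 : Prop := ∀ (data : List String), Dom_check_declaration_v1 data → Spec_check_declaration_v1 data (check_declaration_v1 data)

-- ===== LEMMAS AND PROOFS =====

-- common spec: sum over blank-separated blocks of the number of distinct characters
def pvF (l : List String) : Int :=
  PySem.Set.len (PySem.Set.ofList ((l.takeWhile (fun s => s ≠ "")).flatMap String.toList)) +
    (if h : l.dropWhile (fun s => s ≠ "") = [] then 0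
     else pvF ((l.dropWhile (fun s => s ≠ "")).tail))
termination_by l.length
decreasing_by
  have h1 : (l.dropWhile (fun s => decide (s ≠ ""))).length ≤ l.length :=
    List.length_dropWhile_le _ _
  cases hd : l.dropWhile (fun s => decide (s ≠ "")) with
  | nil => exact absurd hd h
  | cons y r => rw [hd] at h1; simp at h1 ⊢; omega

theorem pvALoop_acc (l : List String) (r : Int) (g : PySem.Set Char) :
    pvALoop l r g = r + pvALoop l 0 g := by
  induction l generalizing r g with
  | nil => simp [pvALoop]
  | cons x xs ih =>
    simp only [pvALoop]
    split
    · rw [ih (r + PySem.Set.len g), ih (0 + PySem.Set.len g)]; ring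
    · rw [ih r]

theorem pvALoop_eq (l : List String) (g : PySem.Set Char) :
    pvALoop l 0 g =
      PySem.Set.len (PySem.Set.update g ((l.takeWhile (fun s => s ≠ "")).flatMap String.toList)) +
        (if l.dropWhile (fun s => s ≠ "") = [] then 0
         else pvALoop ((l.dropWhile (fun s => s ≠ "")).tail) 0 PySem.Set.empty) := by
  induction l generalizing g with
  | nil => simp [pvALoop, PySem.Set.update]
  | cons x xs ih =>
    by_cases hx : x = ""
    · subst hx
      simp only [pvALoop, List.takeWhile_cons, List.dropWhile_cons]
      norm_num
      rw [pvALoop_acc]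
      simp
    · simp only [pvALoop, List.takeWhile_cons, List.dropWhile_cons, hx, decide_not]
      norm_num
      rw [ih]
      simp [PySem.Set.update, List.foldl_append]

theorem pvALoop_F (l : List String) : pvALoop l 0 PySem.Set.empty = pvF l := by
  rw [pvALoop_eq, pvF]
  have hupd : ∀ xs : List Char, PySem.Set.update (PySem.Set.empty (α := Char)) xs = PySem.Set.ofList xs := by
    intro xs; rfl
  rw [hupd]
  congr 1
  by_cases h : l.dropWhile (fun s => s ≠ "") = []
  · rw [if_pos h, dif_pos h]
  · rw [if_neg h, dif_neg h]
    have h1 : (l.dropWhile (fun s => decide (s ≠ ""))).length ≤ l.length :=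
      List.length_dropWhile_le _ _
    have h2 : (l.dropWhile (fun s => decide (s ≠ ""))).length ≠ 0 := by
      simpa [List.length_eq_zero_iff] using h
    exact pvALoop_F ((l.dropWhile (fun s => s ≠ "")).tail)
termination_by l.length
decreasing_by
  simp only [ne_eq, decide_not, List.length_tail] at h1 h2 ⊢
  omega

theorem pvScanJ_eq (data : List String) (i : Nat) :
    pvScanJ data i = i + ((data.drop i).takeWhile (fun s => s ≠ "")).length := by
  rw [pvScanJ]
  by_cases hi : i < data.length
  · rw [if_pos hi]
    have hdrop : data.drop i = data[i] :: data.drop (i + 1) := List.drop_eq_getElem_cons hi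
    by_cases hb : data.getD i "" = ""
    · rw [if_pos hb]
      have : data[i] = "" := by rwa [List.getD_eq_getElem data "" hi] at hb
      rw [hdrop, List.takeWhile_cons, this]
      simp
    · rw [if_neg hb]
      have hne : data[i] ≠ "" := by rwa [List.getD_eq_getElem data "" hi] at hb
      rw [pvScanJ_eq data (i + 1), hdrop, List.takeWhile_cons]
      simp [hne]
      omega
  · rw [if_neg hi]
    rw [List.drop_of_length_le (by omega)]
    simp
termination_by data.length - i

-- two general list facts (searched; not found in Mathlib under these shapes)
theorem pvTakeLenTakeWhile {α : Type} (p : α → Bool) (l : List α) :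
    l.take (l.takeWhile p).length = l.takeWhile p := by
  induction l with
  | nil => simp
  | cons x xs ih => by_cases h : p x <;> simp [h, ih]

theorem pvDropLenTakeWhile {α : Type} (p : α → Bool) (l : List α) :
    l.drop (l.takeWhile p).length = l.dropWhile p := by
  induction l with
  | nil => simp
  | cons x xs ih => by_cases h : p x <;> simp [h, ih]

theorem pvBLoop_F (data : List String) (i : Nat) (total : Int) :
    pvBLoop data i total = total + pvF (data.drop i) := by
  rw [pvBLoop]
  by_cases hi : i < data.length
  · rw [if_pos hi]
    have hj := pvScanJ_eq data i
    set l := data.drop i with hl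
    have htake : l.take (pvScanJ data i - i) = l.takeWhile (fun s => s ≠ "") := by
      rw [hj, Nat.add_sub_cancel_left]
      exact pvTakeLenTakeWhile _ _
    have hdw : data.drop (pvScanJ data i + 1) = (l.dropWhile (fun s => s ≠ "")).tail := by
      rw [hj, Nat.add_assoc, ← List.drop_drop, ← hl, ← List.drop_drop, pvDropLenTakeWhile, List.drop_one]
    have hrec := pvBLoop_F data (pvScanJ data i + 1)
      (total + PySem.Set.len (PySem.Set.ofList ((l.take (pvScanJ data i - i)).flatMap String.toList)))
    rw [hrec, hdw, htake]
    conv_rhs => rw [pvF]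
    by_cases h : l.dropWhile (fun s => s ≠ "") = []
    · rw [dif_pos h, h]
      simp [pvF]
    · rw [dif_neg h]
      ring
  · rw [if_neg hi]
    rw [List.drop_of_length_le (by omega), pvF]
    simp
termination_by data.length - i
decreasing_by
  have := pvScanJ_le data i
  omega

-- ===== VERDICT (by name: the statement is the Claim_ definition above) =====
theorem check_declaration_v1_spec : Claim_equal_check_declaration_v1 := by
  intro data _
  unfold Spec_check_declaration_v1 check_declaration_v1 check_declaration_v1_alt
  rw [pvALoop_F, pvBLoop_F]
  simp
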